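-- pv_equiv track=rewrite | github.com/rmfulton/AdventOfCode2023 | day11/sol2.py | duplicated
-- ===== SOURCE A (Python) =====
-- def duplicated(lines, rowsToDuplicate, columnsToDuplicate):
--     n = len(rowsToDuplicate)
--     m = len(columnsToDuplicate)
--     newLines = []
--     for i in range(n):
--         s = ""
--         for j in range(m):
--             s += lines[i][j]
--             if columnsToDuplicate[j]:
--                 s += lines[i][j]
--         newLines.append(s)
--         if rowsToDuplicate[i]:
--             newLines.append(s)
--     return newLines
-- ===== SOURCE B (Python) =====
-- def duplicated(lines, rowsToDuplicate, columnsToDuplicate):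
--     # build duplicated index sequences once, then gather by pure indexing
--     rowIdx = [k for i, d in enumerate(rowsToDuplicate) for k in ([i, i] if d else [i])]
--     colIdx = [k for j, d in enumerate(columnsToDuplicate) for k in ([j, j] if d else [j])]
--     return ["".join(lines[i][j] for j in colIdx) for i in rowIdx]
-- ===== Notes on version B (the rewrite author's own statement) =====
-- stated objective: alternative
-- what changed: Replaces A's single nested loop that builds each string char-by-char with += and appends rows conditionally by an index-gather algorithm: B first materialises duplicated row- and column-index sequences (each index repeated when flagged) and then produces the output by pure indexing, with no conditional logic in the gather.
import Mathlib
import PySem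

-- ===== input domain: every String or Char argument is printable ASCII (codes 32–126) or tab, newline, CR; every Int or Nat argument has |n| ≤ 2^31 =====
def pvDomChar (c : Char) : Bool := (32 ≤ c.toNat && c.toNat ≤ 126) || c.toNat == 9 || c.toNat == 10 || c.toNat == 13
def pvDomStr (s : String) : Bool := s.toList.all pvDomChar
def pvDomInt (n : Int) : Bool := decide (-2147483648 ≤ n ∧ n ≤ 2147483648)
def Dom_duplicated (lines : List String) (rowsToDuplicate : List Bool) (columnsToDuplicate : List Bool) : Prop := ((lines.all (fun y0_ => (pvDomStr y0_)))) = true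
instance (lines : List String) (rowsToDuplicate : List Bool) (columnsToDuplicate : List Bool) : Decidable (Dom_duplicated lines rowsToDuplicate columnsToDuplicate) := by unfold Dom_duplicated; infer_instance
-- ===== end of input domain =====

-- B replaces A's single nested loop (char-by-char += with conditional duplication inside) by an
-- index-gather: duplicated row/column index sequences are materialised first, the output is then
-- produced by pure indexing; objective: alternative. Same return value on Pre_.

-- ===== PORT A =====
-- Python strings are built char by char with +=; ported on List Char, converted with
-- String.ofList where A appends the finished row. lines[i][j] is ported with the total
-- PySem.List.pyGetD form, exact under Pre_ (both indices always in range there).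
def duplicated (lines : List String) (rowsToDuplicate : List Bool) (columnsToDuplicate : List Bool) : List String :=
  let n : Int := rowsToDuplicate.length
  let m : Int := columnsToDuplicate.length
  (PySem.List.pyRange 0 n 1).foldl (fun newLines i =>
    let s : List Char :=
      (PySem.List.pyRange 0 m 1).foldl (fun s j =>
        let s := s ++ [PySem.List.pyGetD (PySem.List.pyGetD lines i "").toList j ' ']
        if PySem.List.pyGetD columnsToDuplicate j false then
          s ++ [PySem.List.pyGetD (PySem.List.pyGetD lines i "").toList j ' ']
        else s) []
    let newLines := newLines ++ [String.ofList s]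
    if PySem.List.pyGetD rowsToDuplicate i false then newLines ++ [String.ofList s]
    else newLines) []

-- ===== PORT B =====
-- rowIdx/colIdx: the comprehensions over enumerate(...) with [i, i] if flagged else [i],
-- ported as flatMaps over PySem.List.enumerate; the final gather is the comprehension
-- ["".join(lines[i][j] for j in colIdx) for i in rowIdx], a map of a map; lines[i][j] is
-- ported with the total PySem.List.pyGetD form, exact under Pre_ as in port A.
def duplicated_alt (lines : List String) (rowsToDuplicate : List Bool) (columnsToDuplicate : List Bool) : List String :=
  let rowIdx : List Int :=
    (PySem.List.enumerate rowsToDuplicate).flatMap (fun idp => if idp.2 then [idp.1, idp.1] else [idp.1])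
  let colIdx : List Int :=
    (PySem.List.enumerate columnsToDuplicate).flatMap (fun jdp => if jdp.2 then [jdp.1, jdp.1] else [jdp.1])
  rowIdx.map (fun i =>
    String.ofList (colIdx.map (fun j => PySem.List.pyGetD (PySem.List.pyGetD lines i "").toList j ' ')))

-- ===== PRECONDITION & SPEC =====
-- Pre_ is exactly where the Python A returns: with no column flags A never indexes lines
-- (the inner loop is empty); otherwise every i < len(rowsToDuplicate) must index a line and
-- every line so indexed must be at least as long as the column-flag list, or A raises
-- IndexError (B raises there too).
def Pre_duplicated (lines : List String) (rowsToDuplicate : List Bool) (columnsToDuplicate : List Bool) : Prop :=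
  columnsToDuplicate = [] ∨
    (rowsToDuplicate.length ≤ lines.length ∧
      ∀ s ∈ lines.take rowsToDuplicate.length, columnsToDuplicate.length ≤ s.toList.length)
instance (lines : List String) (rowsToDuplicate : List Bool) (columnsToDuplicate : List Bool) : Decidable (Pre_duplicated lines rowsToDuplicate columnsToDuplicate) := by unfold Pre_duplicated; infer_instance
def pvWitness_duplicated : List String × List Bool × List Bool := (["#.", ".#"], [false, true], [true, false])

def Spec_duplicated (lines : List String) (rowsToDuplicate : List Bool) (columnsToDuplicate : List Bool) (out : List String) : Prop := out = duplicated_alt lines rowsToDuplicate columnsToDuplicate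
instance (lines : List String) (rowsToDuplicate : List Bool) (columnsToDuplicate : List Bool) (out : List String) : Decidable (Spec_duplicated lines rowsToDuplicate columnsToDuplicate out) := by unfold Spec_duplicated; infer_instance

-- ===== CLAIM (what is proved, stated in full; the proofs are below) =====
def Claim_equal_duplicated : Prop := ∀ (lines : List String) (rowsToDuplicate : List Bool) (columnsToDuplicate : List Bool), Dom_duplicated lines rowsToDuplicate columnsToDuplicate → Pre_duplicated lines rowsToDuplicate columnsToDuplicate → Spec_duplicated lines rowsToDuplicate columnsToDuplicate (duplicated lines rowsToDuplicate columnsToDuplicate)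

-- ===== LEMMAS AND PROOFS =====

-- the common shape both programs reduce to: expand one row, interleave by the row flags
def pvRowFun (cols : List Bool) (line : String) : String :=
  String.ofList ((line.toList.zip cols).flatMap (fun cd => if cd.2 then [cd.1, cd.1] else [cd.1]))

lemma pvGetD_cons_succ {α : Type} (x : α) (xs : List α) (j : Int) (h : 0 ≤ j) (d : α) :
    PySem.List.pyGetD (x :: xs) (j + 1) d = PySem.List.pyGetD xs j d := by
  obtain ⟨k, rfl⟩ := Int.eq_ofNat_of_zero_le h
  have hk : ((k : Int) + 1) = ((k + 1 : Nat) : Int) := by push_cast; ring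
  rw [hk, PySem.List.pyGetD_natCast, PySem.List.pyGetD_natCast]
  simp [List.getD]

-- a Python loop 'for j in range(len(ys)): … xs[j] … ys[j] …' over two lists is a fold over their zip
lemma pvFoldlIdxZip {α β γ : Type} (dx : α) (dy : β) (g : γ → α → β → γ) :
    ∀ (ys : List β) (xs : List α) (init : γ), ys.length ≤ xs.length →
      (PySem.List.pyRange 0 (ys.length : Int) 1).foldl
          (fun acc j => g acc (PySem.List.pyGetD xs j dx) (PySem.List.pyGetD ys j dy)) init
        = (xs.zip ys).foldl (fun acc p => g acc p.1 p.2) init := by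
  intro ys
  induction ys with
  | nil => intro xs init _; simp [PySem.List.pyRange_one_eq_nil]
  | cons y ys ih =>
    intro xs init hlen
    cases xs with
    | nil => simp at hlen
    | cons x xs =>
      rw [PySem.List.pyRange_one_cons (by exact_mod_cast Nat.succ_pos ys.length)]
      simp only [List.foldl_cons, List.zip_cons_cons]
      rw [PySem.List.pyGetD_zero_cons, PySem.List.pyGetD_zero_cons]
      have hshift : PySem.List.pyRange 1 ((y :: ys).length : Int) 1
          = (PySem.List.pyRange 0 (ys.length : Int) 1).map (· + 1) := by
        simp [PySem.List.pyRange_one]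
        intros; omega
      rw [show (0:Int)+1 = 1 from rfl] at *
      rw [hshift, List.foldl_map]
      rw [PySem.List.foldl_congr_mem
        (g := fun acc j => g acc (PySem.List.pyGetD xs j dx) (PySem.List.pyGetD ys j dy))
        (h := by
          intro acc j hj
          have h0 : (0:Int) ≤ j := ((PySem.List.mem_pyRange_one).1 hj).1
          rw [pvGetD_cons_succ _ _ _ h0, pvGetD_cons_succ _ _ _ h0])]
      exact ih xs _ (by simpa using hlen)

lemma pvFstMemTake {α β : Type} : ∀ (xs : List α) (ys : List β) (p : α × β),
    p ∈ xs.zip ys → p.1 ∈ xs.take ys.length := by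
  intro xs
  induction xs with
  | nil => simp
  | cons x xs ih =>
    intro ys p hp
    cases ys with
    | nil => simp at hp
    | cons y ys =>
      simp only [List.zip_cons_cons, List.mem_cons] at hp
      rcases hp with rfl | hp
      · simp
      · simpa using Or.inr (ih ys p hp)

-- a gather 'for (j, d) in enumerate(flags): … xs[j] …' is a flatMap over the zip
lemma pvEnumGather {α β : Type} (d : α) (f : α → Bool → List β) :
    ∀ (flags : List Bool) (k : Nat) (xs : List α), flags.length + k ≤ xs.length →
    (PySem.List.enumerate flags (k : Int)).flatMap (fun jd => f (PySem.List.pyGetD xs jd.1 d) jd.2)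
      = ((xs.drop k).zip flags).flatMap (fun p => f p.1 p.2) := by
  intro flags
  induction flags with
  | nil => intro k xs _; simp [PySem.List.enumerate_nil]
  | cons b flags ih =>
    intro k xs hlen
    have hk : k < xs.length := by simp at hlen; omega
    rw [PySem.List.enumerate_cons, List.flatMap_cons,
      List.drop_eq_getElem_cons hk, List.zip_cons_cons, List.flatMap_cons]
    have h1 : ((k : Int) + 1) = ((k + 1 : Nat) : Int) := by push_cast; ring
    rw [h1, ih (k + 1) xs (by simp at hlen ⊢; omega)]
    simp [PySem.List.pyGetD_natCast, List.getD_eq_getElem?_getD, List.getElem?_eq_getElem hk]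

-- the k = 0 instance with enumerate's default start argument
lemma pvEnumGather0 {α β : Type} (d : α) (f : α → Bool → List β) (flags : List Bool)
    (xs : List α) (h : flags.length ≤ xs.length) :
    (PySem.List.enumerate flags).flatMap (fun jd => f (PySem.List.pyGetD xs jd.1 d) jd.2)
      = (xs.zip flags).flatMap (fun p => f p.1 p.2) := by
  have := pvEnumGather d f flags 0 xs (by simpa using h)
  simpa using this

-- a flatMap over enumerate that ignores the index is a flatMap over the flags
lemma pvEnumSnd {β : Type} (f : Bool → List β) : ∀ (flags : List Bool) (k : Int),
    (PySem.List.enumerate flags k).flatMap (fun jd => f jd.2) = flags.flatMap f := by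
  intro flags
  induction flags with
  | nil => intro k; simp [PySem.List.enumerate_nil]
  | cons b flags ih => intro k; simp [PySem.List.enumerate_cons, ih]

lemma pvZipSelf {α : Type} : ∀ (xs : List α), xs.zip xs = xs.map (fun x => (x, x)) := by
  intro xs
  induction xs with
  | nil => simp
  | cons x xs ih => simp [ih]

-- the inner loop of A equals pvRowFun when the line is long enough
lemma pvInnerEq (cols : List Bool) (line : String) (h : cols.length ≤ line.toList.length) :
    String.ofList ((PySem.List.pyRange 0 (cols.length : Int) 1).foldl (fun s j =>
        let s := s ++ [PySem.List.pyGetD line.toList j ' ']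
        if PySem.List.pyGetD cols j false then
          s ++ [PySem.List.pyGetD line.toList j ' ']
        else s) [])
      = pvRowFun cols line := by
  rw [pvFoldlIdxZip ' ' false
    (fun s c b => let s := s ++ [c]; if b then s ++ [c] else s) cols line.toList [] h]
  unfold pvRowFun
  congr 1
  rw [PySem.List.foldl_congr_mem
    (g := fun s p => s ++ (if p.2 then [p.1, p.1] else [p.1]))
    (h := by intro s p _; by_cases hb : p.2 <;> simp [hb])]
  rw [PySem.List.foldl_append_eq_flatMap]
  simp

-- mapping through a duplicated-index flatMap pushes the map under the branch
lemma pvMapFlatMapIf {β : Type} (xs : List (Int × Bool)) (F : Int → β) :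
    (xs.flatMap (fun idp => if idp.2 then [idp.1, idp.1] else [idp.1])).map F
      = xs.flatMap (fun idp => if idp.2 then [F idp.1, F idp.1] else [F idp.1]) := by
  rw [List.map_flatMap]
  refine List.flatMap_congr (fun idp _ => ?_)
  by_cases hb : idp.2 <;> simp [hb]

theorem duplicated_spec : Claim_equal_duplicated := by
  intro lines rows cols _ hpre
  unfold Spec_duplicated duplicated duplicated_alt
  rcases hpre with rfl | ⟨hlen, hcols⟩
  · -- no column flags: every expanded row is the empty string on both sides
    simp only [List.length_nil, Nat.cast_zero, PySem.List.pyRange_one_eq_nil (le_refl (0:Int)),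
      List.foldl_nil, PySem.List.enumerate_nil, List.flatMap_nil, List.map_nil]
    -- A side: fold over rows of conditional appends of the empty string
    rw [pvFoldlIdxZip false false
      (fun acc _ row =>
        let newLines := acc ++ [String.ofList []]
        if row then newLines ++ [String.ofList []] else newLines) rows rows [] le_rfl]
    rw [pvZipSelf rows, List.foldl_map]
    rw [PySem.List.foldl_congr_mem
      (g := fun acc r => acc ++ (if r then [String.ofList [], String.ofList []] else [String.ofList []]))
      (h := by intro acc r _; by_cases hb : r <;> simp [hb])]
    rw [PySem.List.foldl_append_eq_flatMap]
    -- B side: rowIdx.map (const "") = rows.flatMap (duplicated empty strings)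
    rw [pvMapFlatMapIf, pvEnumSnd (fun r => if r then [String.ofList [], String.ofList []] else [String.ofList []]) rows 0]
    simp
  · -- general case: both sides reduce to a flatMap of pvRowFun over lines.zip rows
    rw [pvFoldlIdxZip "" false
      (fun acc line row =>
        let s : List Char :=
          (PySem.List.pyRange 0 (cols.length : Int) 1).foldl (fun s j =>
            let s := s ++ [PySem.List.pyGetD line.toList j ' ']
            if PySem.List.pyGetD cols j false then
              s ++ [PySem.List.pyGetD line.toList j ' ']
            else s) []
        let acc := acc ++ [String.ofList s]
        if row then acc ++ [String.ofList s] else acc) rows lines [] hlen]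
    rw [PySem.List.foldl_congr_mem
      (g := fun acc p => acc ++ (if p.2 then [pvRowFun cols p.1, pvRowFun cols p.1] else [pvRowFun cols p.1]))
      (h := by
        intro acc p hp
        have h1 := pvInnerEq cols p.1 (hcols p.1 (pvFstMemTake lines rows p hp))
        simp only []
        rw [h1]
        by_cases hb : p.2 <;> simp [hb])]
    rw [PySem.List.foldl_append_eq_flatMap, List.nil_append]
    -- B side: gather through the duplicated index lists
    rw [pvMapFlatMapIf]
    rw [pvEnumGather0 "" (fun line r =>
        if r then [String.ofList (((PySem.List.enumerate cols).flatMap (fun jdp => if jdp.2 then [jdp.1, jdp.1] else [jdp.1])).map (fun j => PySem.List.pyGetD line.toList j ' ')),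
                   String.ofList (((PySem.List.enumerate cols).flatMap (fun jdp => if jdp.2 then [jdp.1, jdp.1] else [jdp.1])).map (fun j => PySem.List.pyGetD line.toList j ' '))]
        else [String.ofList (((PySem.List.enumerate cols).flatMap (fun jdp => if jdp.2 then [jdp.1, jdp.1] else [jdp.1])).map (fun j => PySem.List.pyGetD line.toList j ' '))])
      rows lines hlen]
    refine (List.flatMap_congr (fun p hp => ?_)).symm
    have hG : ((PySem.List.enumerate cols).flatMap (fun jdp => if jdp.2 then [jdp.1, jdp.1] else [jdp.1])).map
          (fun j => PySem.List.pyGetD p.1.toList j ' ')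
        = (p.1.toList.zip cols).flatMap (fun cd => if cd.2 then [cd.1, cd.1] else [cd.1]) := by
      rw [pvMapFlatMapIf, pvEnumGather0 ' ' (fun c b => if b then [c, c] else [c]) cols p.1.toList
        (hcols p.1 (pvFstMemTake lines rows p hp))]
    rw [hG]
    simp [pvRowFun]
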